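-- pv_equiv track=rewrite | github.com/jc-ricci/math-translator | backend/services/text_extractor.py | make_text_batches
-- ===== SOURCE A (Python) =====
-- TEXT_BATCH_SIZE = 10      # pages per batch for text-based PDFs
--
-- def make_text_batches(pages: list[str]) -> list[str]:
--     """Group pages into TEXT_BATCH_SIZE-page batches.
--
--     Each batch is a single string with page separators.
--     """
--     batches = []
--     for i in range(0, len(pages), TEXT_BATCH_SIZE):
--         chunk_pages = pages[i: i + TEXT_BATCH_SIZE]
--         batch_text = "\n\n%%PAGE_BREAK%%\n\n".join(
--             f"[第 {i + j + 1} 页]\n{text}" for j, text in enumerate(chunk_pages)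
--         )
--         batches.append(batch_text)
--     return batches
-- ===== SOURCE B (Python) =====
-- TEXT_BATCH_SIZE = 10      # pages per batch for text-based PDFs
--
-- PAGE_SEP = "\n\n%%PAGE_BREAK%%\n\n"
--
--
-- def make_text_batches(pages: list[str]) -> list[str]:
--     """Group pages into TEXT_BATCH_SIZE-page batches.
--
--     Single streaming pass: each page either opens a new batch (every
--     10th index) or is appended, with the separator, onto the batch
--     string currently being built.  No slicing and no join.
--     """
--     batches = []
--     for k, text in enumerate(pages):
--         label = f"[第 {k + 1} 页]\n{text}"
--         if k % TEXT_BATCH_SIZE == 0: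
--             batches.append(label)
--         else:
--             batches[-1] += PAGE_SEP + label
--     return batches
-- ===== Notes on version B (the rewrite author's own statement) =====
-- stated objective: alternative
-- what changed: A iterates over batch offsets, slicing out 10-page chunks and joining each with the separator; B is a single streaming pass over the pages that opens a new batch at every 10th index and otherwise concatenates the separator plus label onto the batch string being built (no slicing, no join).
import Mathlib
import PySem

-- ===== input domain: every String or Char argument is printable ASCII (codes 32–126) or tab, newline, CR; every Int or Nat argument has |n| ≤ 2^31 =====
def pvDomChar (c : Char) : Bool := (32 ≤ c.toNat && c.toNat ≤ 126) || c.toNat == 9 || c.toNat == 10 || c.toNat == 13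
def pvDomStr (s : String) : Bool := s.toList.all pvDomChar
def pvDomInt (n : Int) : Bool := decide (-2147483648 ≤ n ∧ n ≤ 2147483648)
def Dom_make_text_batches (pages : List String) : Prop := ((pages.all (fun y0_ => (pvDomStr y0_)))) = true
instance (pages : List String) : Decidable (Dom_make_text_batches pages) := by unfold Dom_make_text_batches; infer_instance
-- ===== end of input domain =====

-- B replaces A's slice-each-chunk-and-join loop by a single streaming pass that grows the last batch string in place; objective: alternative decomposition, same cost.

-- ===== PORT A =====
-- A: one loop over batch offsets; each iteration slices pages and labels them with the offset-based page number inside the join.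
def make_text_batches (pages : List String) : List String :=
  (PySem.List.pyRange 0 (PySem.List.len pages) 10).foldl
    (fun batches i =>
      let chunk_pages := PySem.List.slice pages (some i) (some (i + 10))
      let batch_text := PySem.Str.join "\n\n%%PAGE_BREAK%%\n\n"
        ((PySem.List.enumerate chunk_pages 0).map
          (fun p => "[第 " ++ PySem.Int.toStr (i + p.1 + 1) ++ " 页]\n" ++ p.2))
      batches ++ [batch_text]) []

-- ===== PORT B =====
def PAGE_SEP : String := "\n\n%%PAGE_BREAK%%\n\n"

-- B: one streaming pass over enumerate(pages); every 10th index opens a new batch, any other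
-- index appends the separator plus label onto the last batch.  'batches[-1] += …' is
-- dropLast ++ [last ++ …]; the getD "" default is never used, since index 0 opens a batch
-- before any '+=' runs (in Python an empty 'batches' would raise, which cannot happen).
def make_text_batches_alt (pages : List String) : List String :=
  (PySem.List.enumerate pages 0).foldl
    (fun batches p =>
      let label := "[第 " ++ PySem.Int.toStr (p.1 + 1) ++ " 页]\n" ++ p.2
      if PySem.Int.mod p.1 10 == 0 then
        batches ++ [label]
      else
        batches.dropLast ++ [(batches.getLast?.getD "") ++ PAGE_SEP ++ label]) []

-- ===== PRECONDITION & SPEC =====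
def Spec_make_text_batches (pages : List String) (out : List String) : Prop := out = make_text_batches_alt pages
instance (pages : List String) (out : List String) : Decidable (Spec_make_text_batches pages out) := by unfold Spec_make_text_batches; infer_instance

-- ===== CLAIM (what is proved, stated in full; the proofs are below) =====
def Claim_equal_make_text_batches : Prop := ∀ (pages : List String), Dom_make_text_batches pages → Spec_make_text_batches pages (make_text_batches pages)

-- ===== LEMMAS AND PROOFS =====

-- the page label both programs build
def pvLbl (p : Int × String) : String := "[第 " ++ PySem.Int.toStr (p.1 + 1) ++ " 页]\n" ++ p.2

-- common chunked normal form: the batch for pages.take 10 (numbered from n), then the rest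
def pvChunks : List String → Nat → List String
  | [], _ => []
  | x :: rest, n =>
    PySem.Str.join PAGE_SEP ((PySem.List.enumerate ((x :: rest).take 10) n).map pvLbl)
      :: pvChunks ((x :: rest).drop 10) (n + 10)
termination_by l _ => l.length
decreasing_by simp

theorem pyRange_ten_nil (a b : Int) (h : b ≤ a) :
    PySem.List.pyRange a b 10 = [] := by
  rw [PySem.List.pyRange_of_pos a b (by norm_num)]
  simp [show ¬ a < b by omega]

theorem pyRange_ten_cons (a b : Int) (h : a < b) :
    PySem.List.pyRange a b 10 = a :: PySem.List.pyRange (a + 10) b 10 := by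
  rw [PySem.List.pyRange_of_pos a b (by norm_num),
      PySem.List.pyRange_of_pos (a + 10) b (by norm_num)]
  by_cases h2 : a + 10 < b
  · have hq : ((b - a + 10 - 1) / 10).toNat = ((b - (a + 10) + 10 - 1) / 10).toNat + 1 := by omega
    simp only [if_pos h, if_pos h2, hq, List.range_succ_eq_map, List.map_cons, List.map_map]
    congr 1
    · simp
    · apply List.map_congr_left; intro k _; simp [Function.comp]; ring
  · have hq : ((b - a + 10 - 1) / 10).toNat = 1 := by omega
    simp [if_pos h, if_neg h2, hq, List.range_succ]

theorem map_enumerate_shift (ys : List String) (i s : Int) :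
    (PySem.List.enumerate ys s).map
        (fun p => "[第 " ++ PySem.Int.toStr (i + p.1 + 1) ++ " 页]\n" ++ p.2)
      = (PySem.List.enumerate ys (i + s)).map pvLbl := by
  induction ys generalizing s with
  | nil => simp [PySem.List.enumerate_nil]
  | cons y ys ih =>
    simp only [PySem.List.enumerate_cons, List.map_cons, pvLbl]
    rw [ih (s + 1), show i + (s + 1) = i + s + 1 by ring]

-- A's loop over the range of offsets from n produces the chunked normal form
theorem lemA (pages : List String) (n : Nat) (acc : List String) :
    (PySem.List.pyRange n (pages.length : Int) 10).foldl
      (fun batches i =>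
        batches ++ [PySem.Str.join PAGE_SEP
          ((PySem.List.enumerate ((pages.drop i.toNat).take 10) i).map pvLbl)]) acc
      = acc ++ pvChunks (pages.drop n) n := by
  by_cases h : pages.length ≤ n
  · rw [pyRange_ten_nil _ _ (by exact_mod_cast h)]
    simp [List.drop_eq_nil_of_le h, pvChunks]
  · rw [Nat.not_le] at h
    rw [pyRange_ten_cons _ _ (by exact_mod_cast h)]
    simp only [List.foldl_cons, Int.toNat_natCast]
    rw [show ((n : Int) + 10) = ((n + 10 : Nat) : Int) by push_cast; ring,
        lemA pages (n + 10)]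
    have hne : pages.drop n ≠ [] := by
      intro hc; have := List.drop_eq_nil_iff.mp hc; omega
    obtain ⟨q, qs, hm⟩ := List.exists_cons_of_ne_nil hne
    have hdd : pages.drop (n + 10) = (q :: qs).drop 10 := by
      rw [← hm, List.drop_drop]
    rw [hdd, hm, pvChunks.eq_2]
    simp [List.append_assoc]
termination_by pages.length - n
decreasing_by omega

-- string foldl: prefix pulls out of the separator fold
theorem foldl_sep_shift (l : List String) (s t : String) :
    s ++ l.foldl (fun a p => a ++ PAGE_SEP ++ p) t
      = l.foldl (fun a p => a ++ PAGE_SEP ++ p) (s ++ t) := by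
  induction l generalizing t with
  | nil => simp
  | cons q l ih =>
    simp only [List.foldl_cons]
    rw [ih (t ++ PAGE_SEP ++ q)]
    congr 1
    simp [String.append_assoc]

-- join is the separator fold started at the first element
theorem join_eq_foldl (l : List String) (x : String) :
    PySem.Str.join PAGE_SEP (x :: l) = l.foldl (fun a p => a ++ PAGE_SEP ++ p) x := by
  induction l generalizing x with
  | nil => simp [PySem.Str.join, PySem.Chars.join_singleton]
  | cons q l ih =>
    have hstep : PySem.Str.join PAGE_SEP (x :: q :: l)
        = x ++ PAGE_SEP ++ PySem.Str.join PAGE_SEP (q :: l) := by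
      simp [PySem.Str.join, PySem.Chars.join_cons_cons]
      rw [String.append_assoc]
    rw [hstep, ih q, foldl_sep_shift, List.foldl_cons]

-- B's step function (the port's lambda)
def pvStepB (batches : List String) (p : Int × String) : List String :=
  let label := "[第 " ++ PySem.Int.toStr (p.1 + 1) ++ " 页]\n" ++ p.2
  if PySem.Int.mod p.1 10 == 0 then
    batches ++ [label]
  else
    batches.dropLast ++ [(batches.getLast?.getD "") ++ PAGE_SEP ++ label]

-- within a chunk (no index ≡ 0 mod 10) B only grows the last batch
theorem innerB (zs : List String) (m : Int) (acc : List String) (s : String)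
    (h : ∀ j : Nat, j < zs.length → PySem.Int.mod (m + j) 10 ≠ 0) :
    (PySem.List.enumerate zs m).foldl pvStepB (acc ++ [s])
      = acc ++ [(PySem.List.enumerate zs m).foldl (fun a p => a ++ PAGE_SEP ++ pvLbl p) s] := by
  induction zs generalizing m s with
  | nil => simp [PySem.List.enumerate_nil]
  | cons z zs ih =>
    have h0 : PySem.Int.mod m 10 ≠ 0 := by
      have := h 0 (by simp); simpa using this
    have hnd : ¬ (10 : Int) ∣ m := fun hd =>
      h0 ((PySem.Int.mod_eq_zero_iff_dvd m 10).mpr hd)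
    simp only [PySem.List.enumerate_cons, List.foldl_cons]
    have hstep : pvStepB (acc ++ [s]) (m, z)
        = acc ++ [s ++ PAGE_SEP ++ pvLbl (m, z)] := by
      simp [pvStepB, pvLbl, hnd]
    rw [hstep, ih (m + 1) _ (by
      intro j hj
      have := h (j + 1) (by simp [Nat.succ_lt_succ hj])
      rw [show m + 1 + (j : Int) = m + ((j + 1 : Nat) : Int) by push_cast; ring]
      exact this)]

-- B's streaming pass over pages numbered from a multiple of 10 produces the chunked normal form
theorem lemB (ys : List String) (n : Nat) (acc : List String) (hn : n % 10 = 0) :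
    (PySem.List.enumerate ys (n : Int)).foldl pvStepB acc = acc ++ pvChunks ys n := by
  match ys with
  | [] => rw [PySem.List.enumerate_nil, List.foldl_nil, pvChunks.eq_1, List.append_nil]
  | y :: ys' =>
    have hsplit : (y :: ys' : List String) = (y :: ys').take 10 ++ (y :: ys').drop 10 := by
      simp
    conv_lhs => rw [hsplit]
    rw [PySem.List.enumerate_append, List.foldl_append]
    have htake : (y :: ys').take 10 = y :: ys'.take 9 := by simp [List.take_succ_cons]
    -- first chunk
    have hdvd : (10 : Int) ∣ (n : Int) := by exact_mod_cast Nat.dvd_of_mod_eq_zero hn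
    have hfirst : ((PySem.List.enumerate ((y :: ys').take 10) (n : Int)).foldl pvStepB acc)
        = acc ++ [PySem.Str.join PAGE_SEP
            ((PySem.List.enumerate ((y :: ys').take 10) (n : Int)).map pvLbl)] := by
      rw [htake]
      simp only [PySem.List.enumerate_cons, List.foldl_cons]
      have hstep : pvStepB acc ((n : Int), y) = acc ++ [pvLbl ((n : Int), y)] := by
        simp [pvStepB, pvLbl, hdvd]
      rw [hstep, innerB _ _ _ _ (by
        intro j hj
        have hj9 : j < 9 := lt_of_lt_of_le hj (by simp [List.length_take_le])
        rw [show (n : Int) + 1 + (j : Int) = ((n + 1 + j : Nat) : Int) by push_cast; ring]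
        intro hc
        have h1 : (10 : Int) ∣ ((n + 1 + j : Nat) : Int) :=
          (PySem.Int.mod_eq_zero_iff_dvd _ 10).mp hc
        have h2 : (10 : Nat) ∣ (n + 1 + j) := by exact_mod_cast h1
        omega)]
      rw [List.map_cons, join_eq_foldl, List.foldl_map]
    rw [hfirst]
    -- remaining pages
    by_cases hle : 10 ≤ (y :: ys').length
    · have h10 : ((y :: ys').take 10).length = 10 := by
        simp at hle ⊢
        omega
      rw [h10]
      rw [show (n : Int) + ((10 : Nat) : Int) = ((n + 10 : Nat) : Int) by push_cast; ring]
      rw [lemB ((y :: ys').drop 10) (n + 10) _ (by omega)]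
      conv_rhs => rw [pvChunks.eq_2]
      simp [List.append_assoc]
    · have hdrop : (y :: ys').drop 10 = [] := List.drop_eq_nil_of_le (by omega)
      conv_rhs => rw [pvChunks.eq_2]
      rw [hdrop, pvChunks.eq_1]
      simp [PySem.List.enumerate_nil]
termination_by ys.length
decreasing_by simp only [List.length_drop, List.length_cons]; omega

-- ===== VERDICT (by name: the statement is the Claim_ definition above) =====
theorem make_text_batches_spec : Claim_equal_make_text_batches := by
  intro pages _
  unfold Spec_make_text_batches make_text_batches make_text_batches_alt
  -- A side: rewrite each loop body into the pvLbl/drop-take form, then lemA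
  have hA : (PySem.List.pyRange 0 (PySem.List.len pages) 10).foldl
      (fun batches i =>
        let chunk_pages := PySem.List.slice pages (some i) (some (i + 10))
        let batch_text := PySem.Str.join "\n\n%%PAGE_BREAK%%\n\n"
          ((PySem.List.enumerate chunk_pages 0).map
            (fun p => "[第 " ++ PySem.Int.toStr (i + p.1 + 1) ++ " 页]\n" ++ p.2))
        batches ++ [batch_text]) []
      = pvChunks pages 0 := by
    rw [PySem.List.foldl_congr_mem _ _
      (fun batches i =>
        batches ++ [PySem.Str.join PAGE_SEP
          ((PySem.List.enumerate ((pages.drop i.toNat).take 10) i).map pvLbl)]) _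
      (by
        intro acc i hi
        obtain ⟨h1, h2, h3⟩ := (PySem.List.mem_pyRange_iff_of_pos (by norm_num : (0:Int) < 10) i).1 hi
        have hslice : PySem.List.slice pages (some i) (some (i + 10))
            = (pages.drop i.toNat).take 10 := by
          rw [PySem.List.slice_toNat pages h1 (by omega)]
          congr 1
          omega
        simp only [hslice, map_enumerate_shift _ i 0, add_zero, PAGE_SEP])]
    have := lemA pages 0 []
    simpa using this
  rw [hA]
  have hB := lemB pages 0 [] (by norm_num)
  simp only [Int.natCast_zero] at hB
  rw [show ((PySem.List.enumerate pages 0).foldl (fun batches p =>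
      let label := "[第 " ++ PySem.Int.toStr (p.1 + 1) ++ " 页]\n" ++ p.2
      if PySem.Int.mod p.1 10 == 0 then
        batches ++ [label]
      else
        batches.dropLast ++ [(batches.getLast?.getD "") ++ PAGE_SEP ++ label]) [])
    = (PySem.List.enumerate pages 0).foldl pvStepB [] from rfl, hB]
  simp
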